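-- pv_equiv track=rewrite | github.com/qq1151131109/story_video_generator | utils/robust_output_parser.py | _repair_single_quotes
-- ===== SOURCE A (Python) =====
-- def _repair_single_quotes(text: str) -> str:
--     """修复单引号"""
--     # 将单引号替换为双引号（小心处理字符串内容）
--     in_string = False
--     result = []
--     i = 0
--
--     while i < len(text):
--         char = text[i]
--
--         if char == '"':
--             in_string = not in_string
--             result.append(char)
--         elif char == "'" and not in_string:
--             result.append('"')
--         else:
--             result.append(char)
--         i += 1
--
--     return ''.join(result)
-- ===== SOURCE B (Python) =====
-- def _repair_single_quotes(text: str) -> str: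
--     # split/transform/rejoin: even segments are outside double quotes
--     segments = text.split('"')
--     fixed = [''.join('"' if ch == "'" else ch for ch in seg) if i % 2 == 0 else seg
--              for i, seg in enumerate(segments)]
--     return '"'.join(fixed)
-- ===== Notes on version B (the rewrite author's own statement) =====
-- stated objective: faster
-- what changed: Replaces the stateful char-by-char scan with an in_string flag by a split/transform/rejoin pipeline: split on the double-quote character, replace single quotes only in even-indexed (outside-quotes) segments, rejoin; faster by a constant factor since splitting and joining run in C instead of a Python-level per-character loop.
import Mathlib
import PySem

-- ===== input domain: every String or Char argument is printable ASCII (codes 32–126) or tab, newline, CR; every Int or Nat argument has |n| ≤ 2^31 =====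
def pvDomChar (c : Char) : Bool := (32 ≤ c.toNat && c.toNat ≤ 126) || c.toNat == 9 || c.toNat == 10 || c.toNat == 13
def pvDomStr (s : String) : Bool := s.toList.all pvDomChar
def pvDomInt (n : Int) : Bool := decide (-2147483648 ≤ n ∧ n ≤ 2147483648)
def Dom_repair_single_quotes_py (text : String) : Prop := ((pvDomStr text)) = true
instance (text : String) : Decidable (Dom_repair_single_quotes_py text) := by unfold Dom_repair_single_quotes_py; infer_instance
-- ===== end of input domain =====

-- B replaces the stateful char-by-char scan by a split-on-double-quote / fix-even-segments / rejoin pipeline (measured constant-factor faster in Python).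


-- ===== PORT A =====
-- while-loop over the characters with in_string flag and an accumulating result list
def repair_single_quotes_py (text : String) : String :=
  let r := text.toList.foldl (fun (st : Bool × List Char) c =>
    if c = '"' then (!st.1, st.2 ++ [c])
    else if c = '\'' ∧ st.1 = false then (st.1, st.2 ++ ['"'])
    else (st.1, st.2 ++ [c])) (false, [])
  String.ofList r.2   -- ''.join(result)

-- ===== PORT B =====
-- ''.join('"' if ch == "'" else ch for ch in seg)  (joining single chars = map)
def pvFixSeg (seg : List Char) : List Char :=
  seg.map (fun ch => if ch = '\'' then '"' else ch)

def repair_single_quotes_py_alt (text : String) : String :=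
  let segments := PySem.Chars.splitOn text.toList ['"']
  let fixed := (PySem.List.enumerate segments 0).map
    (fun p => if p.1 % 2 == 0 then pvFixSeg p.2 else p.2)
  String.ofList (PySem.Chars.join ['"'] fixed)

-- ===== PRECONDITION & SPEC =====
def Spec_repair_single_quotes_py (text : String) (out : String) : Prop := out = repair_single_quotes_py_alt text
instance (text : String) (out : String) : Decidable (Spec_repair_single_quotes_py text out) := by unfold Spec_repair_single_quotes_py; infer_instance

-- ===== CLAIM (what is proved, stated in full; the proofs are below) =====
def Claim_equal_repair_single_quotes_py : Prop := ∀ (text : String), Dom_repair_single_quotes_py text → Spec_repair_single_quotes_py text (repair_single_quotes_py text)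

-- ===== LEMMAS AND PROOFS =====

-- A's loop, output-only recursion
def pvLoopA : Bool → List Char → List Char
  | _, [] => []
  | b, c :: cs =>
    if c = '"' then '"' :: pvLoopA (!b) cs
    else if c = '\'' ∧ b = false then '"' :: pvLoopA b cs
    else c :: pvLoopA b cs

lemma pvFoldA (cs : List Char) : ∀ (b : Bool) (acc : List Char),
    (cs.foldl (fun (st : Bool × List Char) c =>
      if c = '"' then (!st.1, st.2 ++ [c])
      else if c = '\'' ∧ st.1 = false then (st.1, st.2 ++ ['"'])
      else (st.1, st.2 ++ [c])) (b, acc)).2 = acc ++ pvLoopA b cs := by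
  induction cs with
  | nil => intro b acc; simp [pvLoopA]
  | cons c cs ih =>
    intro b acc
    by_cases h : c = '"'
    · simp [pvLoopA, h, ih]
    · by_cases h2 : c = '\'' ∧ b = false
      · simp [pvLoopA, h2, ih]
      · simp [pvLoopA, h, h2, ih]

-- split on '"' as a plain structural recursion
def pvSplitQ : List Char → List (List Char)
  | [] => [[]]
  | c :: cs =>
    if c = '"' then [] :: pvSplitQ cs
    else
      match pvSplitQ cs with
      | [] => [[c]]
      | h :: t => (c :: h) :: t

lemma pvSplitQ_ne_nil (cs : List Char) : pvSplitQ cs ≠ [] := by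
  cases cs with
  | nil => simp [pvSplitQ]
  | cons c cs =>
    simp only [pvSplitQ]
    split
    · simp
    · split <;> simp_all

lemma pvGo_cons (c : Char) (cs cur : List Char) (accs : List (List Char)) :
    PySem.Chars.splitOn.go ['"'] (cs.length + 1 + 1) (c :: cs) cur accs =
    (if c = '"' then PySem.Chars.splitOn.go ['"'] (cs.length + 1) cs [] (cur.reverse :: accs)
     else PySem.Chars.splitOn.go ['"'] (cs.length + 1) cs (c :: cur) accs) := by
  have h' : (['"'].isPrefixOf (c :: cs)) = (c == '"') := by simp [List.isPrefixOf, eq_comm]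
  by_cases h : c = '"' <;> simp [PySem.Chars.splitOn.go, h', h]

lemma pvSplitOn_go (cs : List Char) : ∀ (cur : List Char) (accs : List (List Char)),
    PySem.Chars.splitOn.go ['"'] (cs.length + 1) cs cur accs =
      accs.reverse ++ (match pvSplitQ cs with
        | [] => []
        | h :: t => (cur.reverse ++ h) :: t) := by
  induction cs with
  | nil => intro cur accs; simp [PySem.Chars.splitOn.go, pvSplitQ]
  | cons c cs ih =>
    intro cur accs
    rcases hq : pvSplitQ cs with _ | ⟨h, t⟩
    · exact absurd hq (pvSplitQ_ne_nil cs)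
    · by_cases hc : c = '"'
      · rw [show (c :: cs).length + 1 = cs.length + 1 + 1 from by simp, pvGo_cons,
            if_pos hc, ih]
        simp [pvSplitQ, hc, hq]
      · rw [show (c :: cs).length + 1 = cs.length + 1 + 1 from by simp, pvGo_cons,
            if_neg hc, ih]
        simp [pvSplitQ, hc, hq]

lemma pvSplitOn_eq (cs : List Char) : PySem.Chars.splitOn cs ['"'] = pvSplitQ cs := by
  rcases hq : pvSplitQ cs with _ | ⟨h, t⟩
  · exact absurd hq (pvSplitQ_ne_nil cs)
  · rw [PySem.Chars.splitOn, pvSplitOn_go]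
    simp [hq]

-- rejoin with alternating parity, b = in_string flag entering the segment list
def pvGJoin : Bool → List (List Char) → List Char
  | _, [] => []
  | b, [s] => if b then s else pvFixSeg s
  | b, s :: t :: ts => (if b then s else pvFixSeg s) ++ '"' :: pvGJoin (!b) (t :: ts)

lemma pvGJoin_cons_head (b : Bool) (c : Char) (h : List Char) (t : List (List Char)) :
    pvGJoin b ((c :: h) :: t) =
      (if b then c else if c = '\'' then '"' else c) :: pvGJoin b (h :: t) := by
  cases t <;> cases b <;> simp [pvGJoin, pvFixSeg]

lemma pvLoopA_eq_gjoin (cs : List Char) : ∀ b, pvLoopA b cs = pvGJoin b (pvSplitQ cs) := by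
  induction cs with
  | nil => intro b; cases b <;> simp [pvLoopA, pvSplitQ, pvGJoin, pvFixSeg]
  | cons c cs ih =>
    intro b
    rcases hq : pvSplitQ cs with _ | ⟨h, t⟩
    · exact absurd hq (pvSplitQ_ne_nil cs)
    · by_cases hc : c = '"'
      · simp [pvLoopA, pvSplitQ, hc, hq, pvGJoin, ih, pvFixSeg]
      · rw [show pvSplitQ (c :: cs) = (c :: h) :: t from by simp [pvSplitQ, hc, hq],
            pvGJoin_cons_head, ← hq, ← ih b]
        by_cases h2 : c = '\'' ∧ b = false
        · obtain ⟨h2a, h2b⟩ := h2; subst h2b; simp [pvLoopA, h2a]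
        · cases b <;> simp_all [pvLoopA]

lemma pvJoin_enum (segs : List (List Char)) : ∀ (k : Int), 0 ≤ k →
    PySem.Chars.join ['"'] ((PySem.List.enumerate segs k).map
      (fun p => if p.1 % 2 == 0 then pvFixSeg p.2 else p.2)) =
    pvGJoin (!(k % 2 == 0)) segs := by
  induction segs with
  | nil => intro k hk; simp [PySem.List.enumerate, PySem.Chars.join, pvGJoin, List.intercalate]
  | cons s segs ih =>
    intro k hk
    have hpar : ((k + 1) % 2 == 0) = (!(k % 2 == 0)) := by
      have h2 := Int.emod_two_eq k
      rcases h2 with h | h <;> simp [h] <;> omega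
    rcases segs with _ | ⟨t, ts⟩
    · cases hb : (k % 2 == 0) <;>
        simp [PySem.List.enumerate_cons, PySem.List.enumerate_nil,
          PySem.Chars.join, pvGJoin, List.intercalate] <;>
        · intro hd; exfalso; simp at hb; omega
    · have ih' := ih (k + 1) (by omega)
      rw [hpar] at ih'
      cases hb : (k % 2 == 0) <;>
        simp_all [PySem.List.enumerate_cons, PySem.Chars.join_cons_cons, pvGJoin]

-- ===== VERDICT (by name: the statement is the Claim_ definition above) =====
theorem repair_single_quotes_py_spec : Claim_equal_repair_single_quotes_py := by
  intro text _
  unfold Spec_repair_single_quotes_py repair_single_quotes_py repair_single_quotes_py_alt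
  simp only [pvFoldA, pvSplitOn_eq, pvJoin_enum _ 0 (by norm_num)]
  simp [pvLoopA_eq_gjoin]
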